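-- pv_equiv track=rewrite | github.com/Robot-Will/Stino | stino.py | parse_Board_151
-- ===== SOURCE A (Python) =====
-- def get_Value(line):
-- 	line = line.strip()
-- 	if '=' in line:
-- 		index = line.index('=')
-- 		value = line[(index+1):]
-- 	else:
-- 		value = ''
-- 	return value.strip()
--
-- def parse_Board_151(blocks):
-- 	boards = []
-- 	board_names = []
-- 	mcus = []
--
-- 	for block in blocks:
-- 		if block:
-- 			names = []
-- 			cpus = []
-- 			board = get_Value(block[0])
-- 			read_cpu = False
-- 			for line in block:
-- 				if read_cpu:
-- 					cpu = get_Value(line)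
-- 					cpus.append(cpu)
-- 					read_cpu = False
-- 				if '## ' in line:
-- 					board_name = line[3:]
-- 					names.append(board_name)
-- 					read_cpu = True
-- 			boards.append(board)
-- 			board_names.append(names)
-- 			mcus.append(cpus)
-- 	return (boards, board_names, mcus)
-- ===== SOURCE B (Python) =====
-- def get_Value(line):
-- 	line = line.strip()
-- 	if '=' in line:
-- 		index = line.index('=')
-- 		value = line[(index+1):]
-- 	else:
-- 		value = ''
-- 	return value.strip()
--
-- def parse_Board_151(blocks):
-- 	boards = []
-- 	board_names = []
-- 	mcus = []
-- 	for block in blocks: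
-- 		if block:
-- 			boards.append(get_Value(block[0]))
-- 			board_names.append([line[3:] for line in block if '## ' in line])
-- 			mcus.append([get_Value(nxt) for line, nxt in zip(block, block[1:]) if '## ' in line])
-- 	return (boards, board_names, mcus)
-- ===== Notes on version B (the rewrite author's own statement) =====
-- stated objective: simpler
-- what changed: B replaces A's stateful read_cpu flag loop with direct lookahead: names and cpus are built by comprehensions, pairing each '## ' line with its successor via zip(block, block[1:]), which drops a trailing '## ' line's cpu exactly as A does.
import Mathlib
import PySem

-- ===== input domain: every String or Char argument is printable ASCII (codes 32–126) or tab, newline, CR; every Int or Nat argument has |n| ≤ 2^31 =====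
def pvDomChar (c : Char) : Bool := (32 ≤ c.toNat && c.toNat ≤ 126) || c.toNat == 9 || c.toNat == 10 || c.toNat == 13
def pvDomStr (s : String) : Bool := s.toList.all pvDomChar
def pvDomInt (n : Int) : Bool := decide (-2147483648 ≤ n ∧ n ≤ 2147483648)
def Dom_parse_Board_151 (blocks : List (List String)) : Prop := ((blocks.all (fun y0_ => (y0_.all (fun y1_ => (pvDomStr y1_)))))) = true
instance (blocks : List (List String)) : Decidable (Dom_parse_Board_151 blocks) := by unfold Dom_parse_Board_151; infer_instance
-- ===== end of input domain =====

-- B replaces A's deferred-state `read_cpu` flag loop with direct lookahead: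
-- names/cpus are built by comprehensions, cpus pairing each '## ' line with its
-- successor via zip(block, block[1:]); objective: simpler (same cost).

-- ===== PORT A =====
-- shared module helper get_Value (Source B uses the same module-level helper)
-- the test `'## ' in line`, shared by both ports
def hasHH (line : String) : Bool := PySem.Str.isIn "## " line

def get_Value (line : String) : String :=
  let line := PySem.Str.strip line
  let value :=
    if PySem.Str.isIn "=" line then
      -- '=' present, so line.index('=') = find ≥ 0 and does not raise
      PySem.Str.slice line (some (PySem.Str.find line "=" + 1)) none
    else ""
  PySem.Str.strip value

-- one iteration of A's inner `for line in block` loop over state (names, cpus, read_cpu)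
def stepLineA (st : List String × List String × Bool) (line : String) :
    List String × List String × Bool :=
  let st := if st.2.2 then (st.1, st.2.1 ++ [get_Value line], false) else st
  if hasHH line then
    (st.1 ++ [PySem.Str.slice line (some 3) none], st.2.1, true)
  else st

def parse_Board_151 (blocks : List (List String)) :
    List String × List (List String) × List (List String) :=
  blocks.foldl
    (fun acc block =>
      match block with
      | [] => acc          -- `if block:` false
      | b0 :: _ =>
        let r := block.foldl stepLineA ([], [], false)
        (acc.1 ++ [get_Value b0], acc.2.1 ++ [r.1], acc.2.2 ++ [r.2.1]))
    ([], [], [])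

-- ===== PORT B =====
-- [line[3:] for line in block if '## ' in line]
def namesB (block : List String) : List String :=
  (block.filter (fun line => hasHH line)).map
    (fun line => PySem.Str.slice line (some 3) none)

-- [get_Value(nxt) for line, nxt in zip(block, block[1:]) if '## ' in line]
def cpusB (block : List String) : List String :=
  ((block.zip (PySem.List.slice block (some 1) none)).filter
      (fun p => hasHH p.1)).map
    (fun p => get_Value p.2)

def parse_Board_151_alt (blocks : List (List String)) :
    List String × List (List String) × List (List String) :=
  blocks.foldl
    (fun acc block =>
      match block with
      | [] => acc
      | b0 :: _ =>
        (acc.1 ++ [get_Value b0], acc.2.1 ++ [namesB block], acc.2.2 ++ [cpusB block]))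
    ([], [], [])

-- ===== PRECONDITION & SPEC =====
def Spec_parse_Board_151 (blocks : List (List String)) (out : List String × List (List String) × List (List String)) : Prop := out = parse_Board_151_alt blocks
instance (blocks : List (List String)) (out : List String × List (List String) × List (List String)) : Decidable (Spec_parse_Board_151 blocks out) := by unfold Spec_parse_Board_151; infer_instance

-- ===== CLAIM (what is proved, stated in full; the proofs are below) =====
def Claim_equal_parse_Board_151 : Prop := ∀ (blocks : List (List String)), Dom_parse_Board_151 blocks → Spec_parse_Board_151 blocks (parse_Board_151 blocks)

-- ===== LEMMAS AND PROOFS =====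

-- the cpus list A's flag loop produces, read off as a recursion with one-line lookahead
def cpuSpec (rc : Bool) : List String → List String
  | [] => []
  | l :: rest => (if rc then [get_Value l] else []) ++ cpuSpec (hasHH l) rest

-- the flag A's loop ends with
def flagSpec (rc : Bool) : List String → Bool
  | [] => rc
  | l :: rest => flagSpec (if hasHH l then true else (if rc then false else rc)) rest

theorem innerA (lines : List String) (names cpus : List String) (rc : Bool) :
    lines.foldl stepLineA (names, cpus, rc) =
      (names ++ namesB lines, cpus ++ cpuSpec rc lines, flagSpec rc lines) := by
  induction lines generalizing names cpus rc with
  | nil => simp [namesB, cpuSpec, flagSpec]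
  | cons l rest ih =>
    simp only [List.foldl_cons, ih]
    cases rc <;> cases h : hasHH l <;>
      simp [stepLineA, namesB, cpuSpec, flagSpec, h]

theorem cpusB_eq (lines : List String) : cpusB lines = cpuSpec false lines := by
  unfold cpusB
  simp only [zero_le_one, PySem.List.slice_from, Int.toNat_one, List.drop_one]
  induction lines with
  | nil => rfl
  | cons l rest ih =>
    cases rest with
    | nil => simp [cpuSpec]
    | cons l2 rest2 =>
      have e : cpuSpec false (l :: l2 :: rest2) =
          (if hasHH l then [get_Value l2] else []) ++ cpuSpec false (l2 :: rest2) := by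
        cases h : hasHH l <;> cases h2 : hasHH l2 <;> simp [cpuSpec, h, h2]
      rw [e, ← ih]
      cases h : hasHH l <;> simp [h]

-- ===== VERDICT (by name: the statement is the Claim_ definition above) =====
theorem parse_Board_151_spec : Claim_equal_parse_Board_151 := by
  intro blocks hd
  clear hd
  unfold Spec_parse_Board_151 parse_Board_151 parse_Board_151_alt
  simp only [innerA, cpusB_eq, List.nil_append]
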